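-- pv_equiv track=rewrite | github.com/mjpensa/Researcher.vX | strataflow/symbolic/verification.py | _can_reach_any
-- ===== SOURCE A (Python) =====
-- def _can_reach_any(
--
--     start: str,
--     targets: set[str],
--     transitions: dict[str, list[str]],
--     max_depth: int,
-- ) -> bool:
--     """Check if any target is reachable from start."""
--     visited = set()
--     queue = [(start, 0)]
--
--     while queue:
--         state, depth = queue.pop(0)
--
--         if depth > max_depth:
--             continue
--
--         if state in visited:
--             continue
--
--         visited.add(state)
--
--         if state in targets:
--             return True
--
--         for next_state in transitions.get(state, []):
--             queue.append((next_state, depth + 1))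
--
--     return False
-- ===== SOURCE B (Python) =====
-- def _can_reach_any(
--     start: str,
--     targets: set[str],
--     transitions: dict[str, list[str]],
--     max_depth: int,
-- ) -> bool:
--     """Check if any target is reachable from start (level-set BFS)."""
--     frontier = {start}
--     visited = set()
--     depth = 0
--     while frontier and depth <= max_depth:
--         if any(s in targets for s in frontier):
--             return True
--         visited |= frontier
--         frontier = {n for s in frontier for n in transitions.get(s, []) if n not in visited}
--         depth += 1
--     return False
-- ===== Notes on version B (the rewrite author's own statement) =====
-- stated objective: simpler
-- what changed: Replaced the (state, depth) queue BFS with O(n) list.pop(0) and per-node re-enqueueing by a level-synchronous frontier-set BFS: expand the whole frontier each round, check targets per level, and stop when the frontier empties or the depth bound is passed.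
import Mathlib
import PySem

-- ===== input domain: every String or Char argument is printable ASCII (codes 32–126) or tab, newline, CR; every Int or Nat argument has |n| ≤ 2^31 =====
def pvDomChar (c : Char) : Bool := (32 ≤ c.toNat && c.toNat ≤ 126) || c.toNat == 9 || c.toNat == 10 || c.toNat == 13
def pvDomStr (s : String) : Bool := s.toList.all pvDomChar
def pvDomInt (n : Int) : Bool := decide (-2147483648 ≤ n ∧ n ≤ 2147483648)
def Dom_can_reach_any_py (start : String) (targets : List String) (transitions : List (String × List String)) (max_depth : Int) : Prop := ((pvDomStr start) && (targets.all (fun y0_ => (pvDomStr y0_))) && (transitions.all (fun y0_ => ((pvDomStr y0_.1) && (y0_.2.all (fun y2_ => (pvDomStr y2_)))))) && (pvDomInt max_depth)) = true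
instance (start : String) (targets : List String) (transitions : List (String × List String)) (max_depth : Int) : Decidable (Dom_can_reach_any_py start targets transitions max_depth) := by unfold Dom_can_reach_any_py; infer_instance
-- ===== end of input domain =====

-- B replaces A's (state, depth)-queue BFS (with O(n) pop(0)) by a simpler level-synchronous
-- frontier-set BFS; proved to return the same Bool on every input (both are total).


-- ===== PORT A =====
-- transitions.get(state, []) (dict lookup with default; exact: first match in the association list)
def pvSucc (tr : List (String × List String)) (s : String) : List String :=
  PySem.Dict.getD (PySem.Dict.mk tr) s []

-- unfolding lemma for pvSucc (used by the termination argument below)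
theorem pvSucc_cons (k : String) (v : List String) (rest : List (String × List String)) (s : String) :
    pvSucc ((k, v) :: rest) s = if k == s then v else pvSucc rest s := by
  simp [pvSucc, PySem.Dict.getD_eq_get?_getD, PySem.Dict.get?_mk_cons]
  split <;> rfl

-- an upper bound on any successor-list length, used only as a termination measure ingredient
def pvW (tr : List (String × List String)) : Nat :=
  tr.foldr (fun p m => max p.2.length m) 0

theorem pvSucc_len_le (tr : List (String × List String)) (s : String) :
    (pvSucc tr s).length ≤ pvW tr := by
  induction tr with
  | nil => simp [pvSucc, pvW, PySem.Dict.getD_eq_get?_getD, PySem.Dict.get?]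
  | cons p rest ih =>
    obtain ⟨k, v⟩ := p
    rw [pvSucc_cons]
    simp only [pvW, List.foldr]
    split
    · exact Nat.le_max_left _ _
    · exact le_trans ih (Nat.le_max_right _ _)

-- termination measure for the BFS queue loop: entries at depth d weigh (W+1)^(M+1-d)
def pvWeight (M : Int) (W : Nat) (q : List (String × Int)) : Nat :=
  (q.map (fun p => (W + 1) ^ (M + 1 - p.2).toNat)).sum

-- the while-loop of A: queue of (state, depth) pairs, pop from the front, append successors
def aLoop (targets : List String) (transitions : List (String × List String)) (max_depth : Int)
    (queue : List (String × Int)) (visited : PySem.Set String) : Bool :=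
  match queue with
  | [] => false
  | (state, depth) :: rest =>
    if max_depth < depth then
      aLoop targets transitions max_depth rest visited
    else if PySem.Set.contains visited state then
      aLoop targets transitions max_depth rest visited
    else if targets.contains state then true   -- visited.add(state) is dead when we return True
    else
      aLoop targets transitions max_depth
        (rest ++ (pvSucc transitions state).map (fun n => (n, depth + 1)))
        (PySem.Set.add visited state)
termination_by pvWeight max_depth (pvW transitions) queue
decreasing_by
  · simp only [pvWeight, List.map_cons, List.sum_cons]
    have : 0 < (pvW transitions + 1) ^ (max_depth + 1 - depth).toNat := Nat.pow_pos (Nat.succ_pos _)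
    linarith
  · simp only [pvWeight, List.map_cons, List.sum_cons]
    have : 0 < (pvW transitions + 1) ^ (max_depth + 1 - depth).toNat := Nat.pow_pos (Nat.succ_pos _)
    linarith
  · simp only [pvWeight, List.map_append, List.map_cons, List.sum_append, List.sum_cons, List.map_map]
    set W := pvW transitions
    set e := (max_depth + 1 - (depth + 1)).toNat with he
    have hd : (max_depth + 1 - depth).toNat = e + 1 := by omega
    have hlen : (pvSucc transitions state).length ≤ W := pvSucc_len_le transitions state
    have hfun : ((fun p : String × Int => (W + 1) ^ (max_depth + 1 - p.2).toNat) ∘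
        (fun n : String => (n, depth + 1))) = fun _ : String => (W + 1) ^ e := by
      funext n; simp [he]
    rw [hfun, List.map_const', List.sum_replicate, smul_eq_mul, hd]
    have hpos : 0 < (W + 1) ^ e := Nat.pow_pos (Nat.succ_pos _)
    have h1 : (pvSucc transitions state).length * (W + 1) ^ e ≤ W * (W + 1) ^ e :=
      Nat.mul_le_mul_right _ hlen
    have h2 : W * (W + 1) ^ e < (W + 1) ^ (e + 1) := by
      rw [pow_succ]
      calc W * (W + 1) ^ e = (W + 1) ^ e * W := by ring
        _ < (W + 1) ^ e * (W + 1) := (Nat.mul_lt_mul_left hpos).mpr (by omega)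
    linarith

def can_reach_any_py (start : String) (targets : List String) (transitions : List (String × List String)) (max_depth : Int) : Bool :=
  aLoop targets transitions max_depth [(start, 0)] PySem.Set.empty

-- ===== PORT B =====
-- the while-loop of B: whole-frontier expansion, one round per depth level
-- (visited' = visited | frontier is written out inline where Source B binds it to 'visited')
def bLoop (targets : List String) (transitions : List (String × List String)) (max_depth : Int)
    (frontier visited : PySem.Set String) (depth : Int) : Bool :=
  if frontier ≠ [] ∧ depth ≤ max_depth then
    if frontier.any (fun s => targets.contains s) then true
    else
      bLoop targets transitions max_depth
        (frontier.foldl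
          (fun acc s => (pvSucc transitions s).foldl
            (fun acc n => if PySem.Set.contains (PySem.Set.update visited frontier) n then acc
                          else PySem.Set.add acc n) acc)
          PySem.Set.empty)
        (PySem.Set.update visited frontier) (depth + 1)
  else false
termination_by (max_depth + 1 - depth).toNat
decreasing_by omega

def can_reach_any_py_alt (start : String) (targets : List String) (transitions : List (String × List String)) (max_depth : Int) : Bool :=
  bLoop targets transitions max_depth (PySem.Set.add PySem.Set.empty start) PySem.Set.empty 0

-- ===== PRECONDITION & SPEC =====
def Spec_can_reach_any_py (start : String) (targets : List String) (transitions : List (String × List String)) (max_depth : Int) (out : Bool) : Prop := out = can_reach_any_py_alt start targets transitions max_depth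
instance (start : String) (targets : List String) (transitions : List (String × List String)) (max_depth : Int) (out : Bool) : Decidable (Spec_can_reach_any_py start targets transitions max_depth out) := by unfold Spec_can_reach_any_py; infer_instance

-- ===== CLAIM (what is proved, stated in full; the proofs are below) =====
def Claim_equal_can_reach_any_py : Prop := ∀ (start : String) (targets : List String) (transitions : List (String × List String)) (max_depth : Int), Dom_can_reach_any_py start targets transitions max_depth → Spec_can_reach_any_py start targets transitions max_depth (can_reach_any_py start targets transitions max_depth)

-- ===== LEMMAS AND PROOFS =====

-- proof-side mirror of processing one whole BFS level of A:
-- first component = concatenated successors of the newly visited states, second = updated visited set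
def pvStep (tr : List (String × List String)) : List String → PySem.Set String → List String × PySem.Set String
  | [], V => ([], V)
  | s :: L, V =>
    if PySem.Set.contains V s then pvStep tr L V
    else
      let r := pvStep tr L (PySem.Set.add V s)
      (pvSucc tr s ++ r.1, r.2)

theorem aLoop_drain (T : List String) (tr : List (String × List String)) (M : Int) :
    ∀ (q : List (String × Int)) (V : PySem.Set String),
      (∀ p ∈ q, M < p.2) → aLoop T tr M q V = false := by
  intro q
  induction q with
  | nil => intro V _; simp [aLoop]
  | cons p rest ih =>
    intro V h
    obtain ⟨s, d⟩ := p
    rw [aLoop]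
    rw [if_pos (h (s, d) (by simp))]
    exact ih V (fun p hp => h p (by simp [hp]))

theorem pvStep_fst_nil (tr : List (String × List String)) :
    ∀ (L : List String) (V : PySem.Set String), (∀ s ∈ L, s ∈ V) → (pvStep tr L V).1 = [] := by
  intro L
  induction L with
  | nil => intro V _; rfl
  | cons s L ih =>
    intro V h
    have hc : PySem.Set.contains V s = true := (PySem.Set.contains_iff _ _).mpr (h s (by simp))
    rw [pvStep, if_pos hc]
    exact ih V (fun x hx => h x (by simp [hx]))

theorem pvStep_fst_mem (tr : List (String × List String)) :
    ∀ (L : List String) (V : PySem.Set String) (x : String),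
      x ∈ (pvStep tr L V).1 ↔ ∃ s ∈ L, s ∉ V ∧ x ∈ pvSucc tr s := by
  intro L
  induction L with
  | nil => intro V x; simp [pvStep]
  | cons s L ih =>
    intro V x
    by_cases hs : s ∈ V
    · rw [pvStep, if_pos ((PySem.Set.contains_iff _ _).mpr hs), ih]
      constructor
      · rintro ⟨s', h1, h2, h3⟩; exact ⟨s', by simp [h1], h2, h3⟩
      · rintro ⟨s', h1, h2, h3⟩
        rcases List.mem_cons.mp h1 with rfl | h1
        · exact absurd hs h2
        · exact ⟨s', h1, h2, h3⟩
    · have hc : ¬ PySem.Set.contains V s = true := fun h => hs ((PySem.Set.contains_iff _ _).mp h)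
      rw [pvStep, if_neg hc]
      simp only [List.mem_append, ih]
      constructor
      · rintro (hx | ⟨s', h1, h2, h3⟩)
        · exact ⟨s, by simp, hs, hx⟩
        · refine ⟨s', by simp [h1], fun hmem => h2 ?_, h3⟩
          rw [PySem.Set.mem_add]; exact Or.inl hmem
      · rintro ⟨s', h1, h2, h3⟩
        rcases List.mem_cons.mp h1 with rfl | h1
        · exact Or.inl h3
        · by_cases hss : s' = s
          · subst hss; exact Or.inl h3
          · refine Or.inr ⟨s', h1, fun hm => ?_, h3⟩
            rw [PySem.Set.mem_add] at hm
            rcases hm with hm | hm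
            · exact h2 hm
            · exact hss hm
  -- the "first occurrence" variation of V does not change the union of successor lists

theorem pvStep_snd_mem (tr : List (String × List String)) :
    ∀ (L : List String) (V : PySem.Set String) (x : String),
      x ∈ (pvStep tr L V).2 ↔ x ∈ V ∨ x ∈ L := by
  intro L
  induction L with
  | nil => intro V x; simp [pvStep]
  | cons s L ih =>
    intro V x
    by_cases hs : s ∈ V
    · rw [pvStep, if_pos ((PySem.Set.contains_iff _ _).mpr hs), ih]
      constructor
      · rintro (h | h) <;> simp [h]
      · rintro (h | h)
        · exact Or.inl h
        · rcases List.mem_cons.mp h with rfl | h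
          · exact Or.inl hs
          · exact Or.inr h
    · rw [pvStep, if_neg (fun h => hs ((PySem.Set.contains_iff _ _).mp h))]
      show x ∈ (pvStep tr L (PySem.Set.add V s)).2 ↔ _
      rw [ih]
      rw [PySem.Set.mem_add]
      simp only [List.mem_cons]
      tauto

-- A processes one level like pvStep: states at depth d, pending next-level states P at depth d+1
theorem aLoop_level (T : List String) (tr : List (String × List String)) (M : Int) :
    ∀ (L P : List String) (V : PySem.Set String) (d : Int), d ≤ M →
      aLoop T tr M (L.map (fun s => (s, d)) ++ P.map (fun s => (s, d + 1))) V =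
      if ∃ s ∈ L, s ∉ V ∧ s ∈ T then true
      else aLoop T tr M ((P ++ (pvStep tr L V).1).map (fun s => (s, d + 1))) (pvStep tr L V).2 := by
  intro L
  induction L with
  | nil =>
    intro P V d _
    simp [pvStep]
  | cons s L ih =>
    intro P V d hd
    simp only [List.map_cons, List.cons_append]
    rw [aLoop, if_neg (show ¬ M < d by omega)]
    by_cases hs : s ∈ V
    · rw [if_pos ((PySem.Set.contains_iff _ _).mpr hs)]
      rw [ih P V d hd]
      rw [pvStep, if_pos ((PySem.Set.contains_iff _ _).mpr hs)]
      congr 1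
      simp only [eq_iff_iff]
      constructor
      · rintro ⟨s', h1, h2, h3⟩; exact ⟨s', by simp [h1], h2, h3⟩
      · rintro ⟨s', h1, h2, h3⟩
        rcases List.mem_cons.mp h1 with rfl | h1
        · exact absurd hs h2
        · exact ⟨s', h1, h2, h3⟩
    · rw [if_neg (fun h => hs ((PySem.Set.contains_iff _ _).mp h))]
      by_cases ht : s ∈ T
      · rw [if_pos (show T.contains s = true by simpa using ht)]
        rw [if_pos (show ∃ s' ∈ s :: L, s' ∉ V ∧ s' ∈ T from ⟨s, by simp, hs, ht⟩)]
      · rw [if_neg (show ¬ T.contains s = true by simpa using ht)]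
        have hq : (L.map (fun s => (s, d)) ++ P.map (fun s => (s, d + 1))) ++
            (pvSucc tr s).map (fun n => (n, d + 1)) =
            L.map (fun s => (s, d)) ++ (P ++ pvSucc tr s).map (fun s => (s, d + 1)) := by
          simp [List.map_append, List.append_assoc]
        rw [hq, ih (P ++ pvSucc tr s) (PySem.Set.add V s) d hd]
        rw [pvStep, if_neg (fun h => hs ((PySem.Set.contains_iff _ _).mp h))]
        have hcond : (∃ s' ∈ L, s' ∉ PySem.Set.add V s ∧ s' ∈ T) ↔
            (∃ s' ∈ s :: L, s' ∉ V ∧ s' ∈ T) := by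
          constructor
          · rintro ⟨s', h1, h2, h3⟩
            refine ⟨s', by simp [h1], fun hm => h2 ?_, h3⟩
            rw [PySem.Set.mem_add]; exact Or.inl hm
          · rintro ⟨s', h1, h2, h3⟩
            rcases List.mem_cons.mp h1 with rfl | h1
            · exact absurd h3 ht
            · by_cases hss : s' = s
              · subst hss; exact absurd h3 ht
              · refine ⟨s', h1, fun hm => ?_, h3⟩
                rw [PySem.Set.mem_add] at hm
                rcases hm with hm | hm
                · exact h2 hm
                · exact hss hm
          -- the differing element s is not a target, so the conditions agree
        rw [if_congr hcond rfl rfl]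
        congr 2
        simp [List.append_assoc]

-- membership in B's new-frontier fold (inner loop over one successor list)
theorem bfold_inner_mem (V' : PySem.Set String) :
    ∀ (l : List String) (acc : PySem.Set String) (x : String),
      x ∈ l.foldl (fun acc n => if PySem.Set.contains V' n then acc else PySem.Set.add acc n) acc ↔
      x ∈ acc ∨ (x ∈ l ∧ x ∉ V') := by
  intro l
  induction l with
  | nil => intro acc x; simp
  | cons n l ih =>
    intro acc x
    simp only [List.foldl_cons]
    by_cases hn : n ∈ V'
    · rw [if_pos ((PySem.Set.contains_iff _ _).mpr hn), ih]
      constructor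
      · rintro (h | h) <;> simp [h]
      · rintro (h | ⟨h1, h2⟩)
        · exact Or.inl h
        · rcases List.mem_cons.mp h1 with rfl | h1
          · exact absurd hn h2
          · exact Or.inr ⟨h1, h2⟩
    · rw [if_neg (fun h => hn ((PySem.Set.contains_iff _ _).mp h)), ih]
      rw [PySem.Set.mem_add]
      simp only [List.mem_cons]
      by_cases hx : x = n
      · subst hx; tauto
      · tauto

theorem bfold_outer_mem (tr : List (String × List String)) (V' : PySem.Set String) :
    ∀ (F : List String) (acc : PySem.Set String) (x : String),
      x ∈ F.foldl
        (fun acc s => (pvSucc tr s).foldl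
          (fun acc n => if PySem.Set.contains V' n then acc else PySem.Set.add acc n) acc) acc ↔
      x ∈ acc ∨ ((∃ s ∈ F, x ∈ pvSucc tr s) ∧ x ∉ V') := by
  intro F
  induction F with
  | nil => intro acc x; simp
  | cons s F ih =>
    intro acc x
    simp only [List.foldl_cons]
    rw [ih, bfold_inner_mem]
    constructor
    · rintro ((h | ⟨h1, h2⟩) | ⟨⟨s', hs', hx⟩, h2⟩)
      · exact Or.inl h
      · exact Or.inr ⟨⟨s, by simp, h1⟩, h2⟩
      · exact Or.inr ⟨⟨s', by simp [hs'], hx⟩, h2⟩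
    · rintro (h | ⟨⟨s', hs', hx⟩, h2⟩)
      · exact Or.inl (Or.inl h)
      · rcases List.mem_cons.mp hs' with rfl | hs'
        · exact Or.inl (Or.inr ⟨hx, h2⟩)
        · exact Or.inr ⟨⟨s', hs', hx⟩, h2⟩

-- the bridge: A's queue of one level's states versus B's frontier set, related by membership
theorem bridge (T : List String) (tr : List (String × List String)) (M : Int) :
    ∀ (k : Nat) (d : Int) (Q : List String) (F VA VB : PySem.Set String),
      d ≤ M → (M - d).toNat ≤ k →
      (∀ x, x ∈ F ↔ (x ∈ Q ∧ x ∉ VA)) →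
      (∀ x, x ∈ VA ↔ x ∈ VB) →
      aLoop T tr M (Q.map (fun s => (s, d))) VA = bLoop T tr M F VB d := by
  intro k
  induction k with
  | zero =>
    intro d Q F VA VB hd hk hF hV
    -- here d = M: one level left on both sides, then both drain to false
    have hlevel := aLoop_level T tr M Q [] VA d hd
    simp only [List.map_nil, List.append_nil, List.nil_append] at hlevel
    rw [hlevel, bLoop]
    by_cases hFne : F = ([] : List String)
    · subst hFne
      rw [if_neg (show ¬ (([] : List String) ≠ [] ∧ d ≤ M) by simp)]
      rw [if_neg (show ¬ ∃ s ∈ Q, s ∉ VA ∧ s ∈ T by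
        rintro ⟨s, h1, h2, h3⟩; exact absurd ((hF s).mpr ⟨h1, h2⟩) (List.not_mem_nil))]
      rw [pvStep_fst_nil tr Q VA (fun s hs => by
        by_contra hns
        exact absurd ((hF s).mpr ⟨hs, hns⟩) (List.not_mem_nil))]
      simp [aLoop]
    · rw [if_pos (show F ≠ [] ∧ d ≤ M from ⟨hFne, hd⟩)]
      have hconds : (∃ s ∈ Q, s ∉ VA ∧ s ∈ T) ↔ (F.any (fun s => T.contains s) = true) := by
        simp only [List.any_eq_true, List.contains_iff_mem]
        constructor
        · rintro ⟨s, h1, h2, h3⟩; exact ⟨s, (hF s).mpr ⟨h1, h2⟩, h3⟩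
        · rintro ⟨s, h1, h3⟩
          obtain ⟨hq, hv⟩ := (hF s).mp h1
          exact ⟨s, hq, hv, h3⟩
      by_cases hc : ∃ s ∈ Q, s ∉ VA ∧ s ∈ T
      · rw [if_pos hc, if_pos (hconds.mp hc)]
      · rw [if_neg hc, if_neg (fun h => hc (hconds.mpr h))]
        have hdm : M < d + 1 := by omega
        rw [aLoop_drain T tr M _ _ (by
          intro p hp
          simp only [List.mem_map] at hp
          obtain ⟨s, _, rfl⟩ := hp
          simpa using hdm)]
        rw [bLoop, if_neg (by rintro ⟨_, h⟩; omega)]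
  | succ k ih =>
    intro d Q F VA VB hd hk hF hV
    have hlevel := aLoop_level T tr M Q [] VA d hd
    simp only [List.map_nil, List.append_nil, List.nil_append] at hlevel
    rw [hlevel, bLoop]
    by_cases hFne : F = ([] : List String)
    · subst hFne
      rw [if_neg (show ¬ (([] : List String) ≠ [] ∧ d ≤ M) by simp)]
      rw [if_neg (show ¬ ∃ s ∈ Q, s ∉ VA ∧ s ∈ T by
        rintro ⟨s, h1, h2, h3⟩; exact absurd ((hF s).mpr ⟨h1, h2⟩) (List.not_mem_nil))]
      rw [pvStep_fst_nil tr Q VA (fun s hs => by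
        by_contra hns
        exact absurd ((hF s).mpr ⟨hs, hns⟩) (List.not_mem_nil))]
      simp [aLoop]
    · rw [if_pos (show F ≠ [] ∧ d ≤ M from ⟨hFne, hd⟩)]
      have hconds : (∃ s ∈ Q, s ∉ VA ∧ s ∈ T) ↔ (F.any (fun s => T.contains s) = true) := by
        simp only [List.any_eq_true, List.contains_iff_mem]
        constructor
        · rintro ⟨s, h1, h2, h3⟩; exact ⟨s, (hF s).mpr ⟨h1, h2⟩, h3⟩
        · rintro ⟨s, h1, h3⟩
          obtain ⟨hq, hv⟩ := (hF s).mp h1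
          exact ⟨s, hq, hv, h3⟩
      by_cases hc : ∃ s ∈ Q, s ∉ VA ∧ s ∈ T
      · rw [if_pos hc, if_pos (hconds.mp hc)]
      · rw [if_neg hc, if_neg (fun h => hc (hconds.mpr h))]
        by_cases hdm : d + 1 ≤ M
        · -- recurse to the next level with the membership relations re-established
          apply ih (d + 1) (pvStep tr Q VA).1 _ (pvStep tr Q VA).2 _ hdm (by omega)
          · intro x
            rw [bfold_outer_mem, pvStep_fst_mem, pvStep_snd_mem]
            constructor
            · rintro (h | ⟨⟨s, hs, hx⟩, h2⟩)
              · exact absurd h List.not_mem_nil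
              · obtain ⟨hq, hv⟩ := (hF s).mp hs
                refine ⟨⟨s, hq, hv, hx⟩, fun hu => h2 ?_⟩
                rw [PySem.Set.mem_update]
                rcases hu with hu | hu
                · exact Or.inl ((hV x).mp hu)
                · exact Or.inr ((hF x).mpr ⟨hu, fun hva => h2 (by
                    rw [PySem.Set.mem_update]; exact Or.inl ((hV x).mp hva))⟩)
            · rintro ⟨⟨s, hq, hv, hx⟩, h2⟩
              refine Or.inr ⟨⟨s, (hF s).mpr ⟨hq, hv⟩, hx⟩, fun hm => h2 ?_⟩
              rw [PySem.Set.mem_update] at hm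
              rcases hm with hm | hm
              · exact Or.inl ((hV x).mpr hm)
              · obtain ⟨hq', _⟩ := (hF x).mp hm
                exact Or.inr hq'
          · intro x
            rw [pvStep_snd_mem, PySem.Set.mem_update]
            constructor
            · rintro (h | h)
              · exact Or.inl ((hV x).mp h)
              · by_cases hva : x ∈ VA
                · exact Or.inl ((hV x).mp hva)
                · exact Or.inr ((hF x).mpr ⟨h, hva⟩)
            · rintro (h | h)
              · exact Or.inl ((hV x).mpr h)
              · exact Or.inr ((hF x).mp h).1
        · -- d = M again: both sides finish with false
          rw [aLoop_drain T tr M _ _ (by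
            intro p hp
            simp only [List.mem_map] at hp
            obtain ⟨s, _, rfl⟩ := hp
            simp; omega)]
          rw [bLoop, if_neg (by rintro ⟨_, h⟩; omega)]

-- ===== VERDICT (by name: the statement is the Claim_ definition above) =====
theorem can_reach_any_py_spec : Claim_equal_can_reach_any_py := by
  intro start targets transitions max_depth _hdom
  unfold Spec_can_reach_any_py can_reach_any_py can_reach_any_py_alt
  by_cases hM : max_depth < 0
  · rw [aLoop, if_pos hM, aLoop]
    rw [bLoop, if_neg (by rintro ⟨_, h⟩; omega)]
  · have h0 : (0 : Int) ≤ max_depth := by omega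
    have hrw : [(start, (0 : Int))] = [start].map (fun s => (s, (0 : Int))) := by simp
    rw [hrw]
    apply bridge targets transitions max_depth (max_depth - 0).toNat 0 [start]
      (PySem.Set.add PySem.Set.empty start) PySem.Set.empty PySem.Set.empty h0 (le_refl _)
    · intro x
      rw [PySem.Set.mem_add]
      simp [PySem.Set.empty]
    · intro x; rfl
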